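-- pv_equiv track=rewrite | github.com/BL4-1/smartshark | backend/server.py | get_level_title
-- ===== SOURCE A (Python) =====
-- LEVEL_TITLES = [
--     (1, "Explorer"),
--     (5, "Challenger"),
--     (10, "Mastermind"),
--     (15, "Legend"),
--     (20, "Apex Shark")
-- ]
--
-- def get_level_title(level):
--     title = "Explorer"
--     for lvl, t in LEVEL_TITLES:
--         if level >= lvl:
--             title = t
--         else:
--             break
--     return title
-- ===== SOURCE B (Python) =====
-- THRESHOLDS = [1, 5, 10, 15, 20]
-- TITLES = ["Explorer", "Challenger", "Mastermind", "Legend", "Apex Shark"]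
--
-- def get_level_title(level):
--     # bisect_right over the threshold table (hand-rolled: module A imports nothing)
--     lo, hi = 0, len(THRESHOLDS)
--     while lo < hi:
--         mid = (lo + hi) // 2
--         if THRESHOLDS[mid] <= level:
--             lo = mid + 1
--         else:
--             hi = mid
--     return "Explorer" if lo == 0 else TITLES[lo - 1]
-- ===== Notes on version B (the rewrite author's own statement) =====
-- stated objective: alternative
-- what changed: Replaces the linear scan-with-break over the (threshold, title) pairs by a hand-rolled bisect_right binary search over a sorted threshold list, indexing a parallel title table.
import Mathlib
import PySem

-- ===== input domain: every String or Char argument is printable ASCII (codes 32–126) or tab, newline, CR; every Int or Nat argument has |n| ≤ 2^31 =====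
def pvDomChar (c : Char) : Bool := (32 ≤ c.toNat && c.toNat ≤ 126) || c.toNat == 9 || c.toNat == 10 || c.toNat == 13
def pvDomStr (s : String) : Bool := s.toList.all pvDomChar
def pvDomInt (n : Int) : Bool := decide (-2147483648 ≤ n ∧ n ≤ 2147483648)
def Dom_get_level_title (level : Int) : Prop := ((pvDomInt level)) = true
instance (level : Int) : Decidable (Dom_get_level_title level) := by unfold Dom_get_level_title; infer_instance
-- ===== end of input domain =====

-- B replaces A's linear scan-with-break by a binary search (bisect_right) over the threshold table; alternative structure, same result.

-- ===== PORT A =====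
def pvLevelTitles : List (Int × String) :=
  [(1, "Explorer"), (5, "Challenger"), (10, "Mastermind"), (15, "Legend"), (20, "Apex Shark")]

-- the for-loop with break, as structural recursion over the table
def pvLoopA (level : Int) (title : String) : List (Int × String) → String
  | [] => title
  | (lvl, t) :: rest => if level ≥ lvl then pvLoopA level t rest else title

def get_level_title (level : Int) : String :=
  pvLoopA level "Explorer" pvLevelTitles

-- ===== PORT B =====
def pvThresholds : List Int := [1, 5, 10, 15, 20]
def pvTitles : List String := ["Explorer", "Challenger", "Mastermind", "Legend", "Apex Shark"]

-- hand-rolled bisect_right loop: while lo < hi …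
def pvBisect (level : Int) (lo hi : Nat) : Nat :=
  if _h : lo < hi then
    let mid := (lo + hi) / 2
    if pvThresholds.getD mid 0 ≤ level then pvBisect level (mid + 1) hi
    else pvBisect level lo mid
  else lo
termination_by hi - lo
decreasing_by all_goals omega

def get_level_title_alt (level : Int) : String :=
  let lo := pvBisect level 0 pvThresholds.length
  if lo = 0 then "Explorer" else pvTitles.getD (lo - 1) ""

-- ===== PRECONDITION & SPEC =====
def Spec_get_level_title (level : Int) (out : String) : Prop := out = get_level_title_alt level
instance (level : Int) (out : String) : Decidable (Spec_get_level_title level out) := by unfold Spec_get_level_title; infer_instance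

-- ===== CLAIM (what is proved, stated in full; the proofs are below) =====
def Claim_equal_get_level_title : Prop := ∀ (level : Int), Dom_get_level_title level → Spec_get_level_title level (get_level_title level)

-- ===== LEMMAS AND PROOFS =====

-- ===== VERDICT (by name: the statement is the Claim_ definition above) =====
theorem get_level_title_spec : Claim_equal_get_level_title := by
  intro level _
  unfold Spec_get_level_title
  rcases Decidable.em ((1 : Int) ≤ level) with h1 | h1 <;>
  rcases Decidable.em ((5 : Int) ≤ level) with h2 | h2 <;>
  rcases Decidable.em ((10 : Int) ≤ level) with h3 | h3 <;>
  rcases Decidable.em ((15 : Int) ≤ level) with h4 | h4 <;>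
  rcases Decidable.em ((20 : Int) ≤ level) with h5 | h5 <;>
  · first
    | omega
    | simp [get_level_title, get_level_title_alt, pvLoopA, pvLevelTitles, pvBisect,
            pvThresholds, pvTitles, h1, h2, h3, h4, h5]
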